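-- pv_equiv track=rewrite | github.com/niuz3199-collab/sh-sz300-financials-review | scripts/prepare_manual_hardest_pdf_folder.py | parse_message
-- ===== SOURCE A (Python) =====
-- from typing import Dict, List, Tuple
--
-- def parse_message(message: str) -> Tuple[List[str], List[str]]:
--     missing_pages: List[str] = []
--     missing_fields: List[str] = []
--     for part in str(message or "").split(";"):
--         part = part.strip()
--         if part.startswith("missing_pages="):
--             missing_pages = [item.strip() for item in part.split("=", 1)[1].split(",") if item.strip()]
--         elif part.startswith("missing_fields="):
--             missing_fields = [item.strip() for item in part.split("=", 1)[1].split(",") if item.strip()]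
--     return missing_pages, missing_fields
-- ===== SOURCE B (Python) =====
-- def parse_message(message):
--     table = {}
--     for part in str(message or "").split(";"):
--         part = part.strip()
--         if "=" in part:
--             key, value = part.split("=", 1)
--             table[key] = value
--
--     def pick(key):
--         return [item.strip() for item in table.get(key, "").split(",") if item.strip()]
--
--     return pick("missing_pages"), pick("missing_fields")
-- ===== Notes on version B (the rewrite author's own statement) =====
-- stated objective: simpler
-- what changed: Replaces the branch-per-key scan with a generic key=value table build (one dict pass, last-wins by overwrite) followed by two uniform lookups through a single pick() helper.
import Mathlib
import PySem

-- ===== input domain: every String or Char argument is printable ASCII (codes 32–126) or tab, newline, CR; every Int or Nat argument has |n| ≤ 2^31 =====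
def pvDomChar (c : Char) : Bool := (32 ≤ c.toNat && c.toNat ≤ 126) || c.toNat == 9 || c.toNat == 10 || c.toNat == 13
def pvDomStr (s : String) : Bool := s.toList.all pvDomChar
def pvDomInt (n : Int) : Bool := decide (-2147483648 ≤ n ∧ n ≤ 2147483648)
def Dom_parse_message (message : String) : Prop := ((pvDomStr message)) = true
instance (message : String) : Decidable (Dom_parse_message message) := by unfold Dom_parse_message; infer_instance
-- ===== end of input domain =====

-- B replaces A's branch-per-key scan with a generic key=value table build followed by two lookups (objective: simpler).

-- shared comprehension: [item.strip() for item in v.split(",") if item.strip()]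
def pvItems (v : String) : List String :=
  (((PySem.Str.split? v ",").getD []).map PySem.Str.strip).filter (fun i => i ≠ "")

-- ===== PORT A =====
-- pyGetD with default "" is exact: the startswith guard guarantees the split has a second piece.
def parse_message (message : String) : List String × List String :=
  ((PySem.Str.split? (if message = "" then "" else message) ";").getD []).foldl
    (fun st part =>
      let p := PySem.Str.strip part
      if PySem.Str.startswith p "missing_pages=" then
        (pvItems (PySem.List.pyGetD ((PySem.Str.splitMax? p "=" 1).getD []) 1 ""), st.2)
      else if PySem.Str.startswith p "missing_fields=" then
        (st.1, pvItems (PySem.List.pyGetD ((PySem.Str.splitMax? p "=" 1).getD []) 1 ""))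
      else st)
    ([], [])

-- ===== PORT B =====
def parse_message_alt (message : String) : List String × List String :=
  let table := ((PySem.Str.split? (if message = "" then "" else message) ";").getD []).foldl
    (fun d part =>
      let p := PySem.Str.strip part
      if PySem.Str.isIn "=" p then
        let pieces := (PySem.Str.splitMax? p "=" 1).getD []
        d.insert (PySem.List.pyGetD pieces 0 "") (PySem.List.pyGetD pieces 1 "")
      else d)
    PySem.Dict.empty
  (pvItems (table.getD "missing_pages" ""), pvItems (table.getD "missing_fields" ""))

-- ===== PRECONDITION & SPEC =====
def Spec_parse_message (message : String) (out : List String × List String) : Prop := out = parse_message_alt message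
instance (message : String) (out : List String × List String) : Decidable (Spec_parse_message message out) := by unfold Spec_parse_message; infer_instance

-- ===== CLAIM (what is proved, stated in full; the proofs are below) =====
def Claim_equal_parse_message : Prop := ∀ (message : String), Dom_parse_message message → Spec_parse_message message (parse_message message)


-- ===== LEMMAS AND PROOFS =====

-- the "m = 0" phase of splitOnMax.go: the remainder is emitted as the final piece
lemma pv_go_zero (fuel : Nat) (s : List Char) (acc : List (List Char)) :
    PySem.Chars.splitOnMax.go ['='] fuel 0 s [] acc = acc.reverse ++ [s] := by
  cases fuel with
  | zero => simp [PySem.Chars.splitOnMax.go]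
  | succ n => cases s <;> simp [PySem.Chars.splitOnMax.go]

-- the "m = 1" phase: split at the first '=' (if any)
lemma pv_go_one (fuel : Nat) (s cur : List Char) (acc : List (List Char))
    (h : s.length < fuel) :
    PySem.Chars.splitOnMax.go ['='] fuel 1 s cur acc =
      acc.reverse ++ (if '=' ∈ s then
        [cur.reverse ++ List.takeWhile (fun x => !decide (x = '=')) s,
         (List.dropWhile (fun x => !decide (x = '=')) s).tail]
      else [cur.reverse ++ s]) := by
  induction fuel generalizing s cur acc with
  | zero => omega
  | succ n ih =>
    cases s with
    | nil => simp [PySem.Chars.splitOnMax.go]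
    | cons c rest =>
      by_cases hc : c = '='
      · subst hc
        simp [PySem.Chars.splitOnMax.go, List.isPrefixOf, pv_go_zero]
      · have hlt : rest.length < n := by simp at h; omega
        have hpre : List.isPrefixOf ['='] (c :: rest) = false := by
          simp [List.isPrefixOf]
          exact fun hx => absurd hx.symm hc
        have hc' : ¬ ('=' = c) := fun hx => hc hx.symm
        simp only [PySem.Chars.splitOnMax.go, hpre, Bool.false_eq_true, if_false,
          if_neg (by omega : ¬ (1 : Nat) = 0)]
        rw [ih rest (c :: cur) acc hlt]
        simp [hc, hc']

lemma pv_splitOnMax_one (s : List Char) :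
    PySem.Chars.splitOnMax s ['='] 1 =
      if '=' ∈ s then
        [List.takeWhile (fun x => !decide (x = '=')) s,
         (List.dropWhile (fun x => !decide (x = '=')) s).tail]
      else [s] := by
  have := pv_go_one (s.length + 1) s [] [] (by omega)
  simpa [PySem.Chars.splitOnMax] using this

lemma pv_takeWhile_eq (k t : List Char) (hk : '=' ∉ k) :
    List.takeWhile (fun x => !decide (x = '=')) (k ++ '=' :: t) = k := by
  induction k with
  | nil => simp
  | cons a as ih =>
    have ha : ¬ (a = '=') := fun hx => hk (by simp [hx])
    simp [ha, ih (fun hx => hk (List.mem_cons_of_mem _ hx))]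

lemma pv_decomp (s : List Char) (h : '=' ∈ s) :
    s = List.takeWhile (fun x => !decide (x = '=')) s ++
        '=' :: (List.dropWhile (fun x => !decide (x = '=')) s).tail := by
  induction s with
  | nil => cases h
  | cons c rest ih =>
    by_cases hc : c = '='
    · subst hc; simp
    · have hr : '=' ∈ rest := by
        rcases List.mem_cons.mp h with h1 | h1
        · exact absurd h1.symm hc
        · exact h1
      simp only [List.takeWhile_cons, List.dropWhile_cons]
      simp [hc]
      exact ih hr

-- startswith "<k>=" characterised by the first-'=' decomposition
lemma pv_sw_iff (s k : List Char) (hk : '=' ∉ k) :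
    List.isPrefixOf (k ++ ['=']) s = true ↔
      ('=' ∈ s ∧ List.takeWhile (fun x => !decide (x = '=')) s = k) := by
  rw [List.isPrefixOf_iff_prefix]
  constructor
  · rintro ⟨t, ht⟩
    have hs : s = k ++ '=' :: t := by simpa using ht.symm
    subst hs
    exact ⟨by simp, pv_takeWhile_eq k t hk⟩
  · rintro ⟨hm, htk⟩
    refine ⟨(List.dropWhile (fun x => !decide (x = '=')) s).tail, ?_⟩
    conv_rhs => rw [pv_decomp s hm]
    rw [htk]
    simp

lemma pv_sw_pages (s : String) :
    PySem.Str.startswith s "missing_pages=" = true ↔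
      ('=' ∈ s.toList ∧
        List.takeWhile (fun x => !decide (x = '=')) s.toList = "missing_pages".toList) := by
  have he : "missing_pages=".toList = "missing_pages".toList ++ ['='] := by decide
  have hk : '=' ∉ "missing_pages".toList := by decide
  unfold PySem.Str.startswith PySem.Chars.startswith
  rw [he]
  exact pv_sw_iff _ _ hk

lemma pv_sw_fields (s : String) :
    PySem.Str.startswith s "missing_fields=" = true ↔
      ('=' ∈ s.toList ∧
        List.takeWhile (fun x => !decide (x = '=')) s.toList = "missing_fields".toList) := by
  have he : "missing_fields=".toList = "missing_fields".toList ++ ['='] := by decide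
  have hk : '=' ∉ "missing_fields".toList := by decide
  unfold PySem.Str.startswith PySem.Chars.startswith
  rw [he]
  exact pv_sw_iff _ _ hk

lemma pv_isIn_str (s : String) : PySem.Str.isIn "=" s = true ↔ '=' ∈ s.toList := by
  have he : "=".toList = ['='] := by decide
  unfold PySem.Str.isIn
  rw [he, PySem.Chars.isIn_iff_infix, List.singleton_infix_iff]

lemma pv_split_eq (s : String) (h : '=' ∈ s.toList) :
    (PySem.Str.splitMax? s "=" 1).getD [] =
      [String.ofList (List.takeWhile (fun x => !decide (x = '=')) s.toList),
       String.ofList ((List.dropWhile (fun x => !decide (x = '=')) s.toList).tail)] := by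
  have he : "=".toList = ['='] := by decide
  simp [PySem.Str.splitMax?, PySem.Chars.splitMax?, he, pv_splitOnMax_one, h]

lemma pv_pyGetD_zero (a b : String) : PySem.List.pyGetD [a, b] (0 : Int) "" = a := by
  simp [pysem]

lemma pv_pyGetD_one (a b : String) : PySem.List.pyGetD [a, b] (1 : Int) "" = b := by
  simp [pysem]

lemma pv_pvItems_empty : pvItems "" = [] := by decide

-- one loop step of A matches one table step of B, through the two lookups
lemma pv_step (part : String) (d : PySem.Dict String String) :
    (if PySem.Str.startswith (PySem.Str.strip part) "missing_pages=" = true then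
       (pvItems (PySem.List.pyGetD ((PySem.Str.splitMax? (PySem.Str.strip part) "=" 1).getD []) 1 ""),
         pvItems (d.getD "missing_fields" ""))
     else if PySem.Str.startswith (PySem.Str.strip part) "missing_fields=" = true then
       (pvItems (d.getD "missing_pages" ""),
         pvItems (PySem.List.pyGetD ((PySem.Str.splitMax? (PySem.Str.strip part) "=" 1).getD []) 1 ""))
     else (pvItems (d.getD "missing_pages" ""), pvItems (d.getD "missing_fields" ""))) =
    (pvItems ((if PySem.Str.isIn "=" (PySem.Str.strip part) = true then
        d.insert (PySem.List.pyGetD ((PySem.Str.splitMax? (PySem.Str.strip part) "=" 1).getD []) 0 "")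
          (PySem.List.pyGetD ((PySem.Str.splitMax? (PySem.Str.strip part) "=" 1).getD []) 1 "")
      else d).getD "missing_pages" ""),
     pvItems ((if PySem.Str.isIn "=" (PySem.Str.strip part) = true then
        d.insert (PySem.List.pyGetD ((PySem.Str.splitMax? (PySem.Str.strip part) "=" 1).getD []) 0 "")
          (PySem.List.pyGetD ((PySem.Str.splitMax? (PySem.Str.strip part) "=" 1).getD []) 1 "")
      else d).getD "missing_fields" "")) := by
  set s := PySem.Str.strip part with hs
  by_cases h1 : PySem.Str.startswith s "missing_pages=" = true
  · obtain ⟨hm, htk⟩ := (pv_sw_pages s).mp h1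
    have hin : PySem.Str.isIn "=" s = true := (pv_isIn_str s).mpr hm
    rw [if_pos h1]
    simp only [if_pos hin]
    rw [pv_split_eq s hm, pv_pyGetD_zero, pv_pyGetD_one, htk, String.ofList_toList,
      PySem.Dict.getD_insert, PySem.Dict.getD_insert, if_pos rfl,
      if_neg (by decide : ¬ ("missing_fields" : String) = "missing_pages")]
  · by_cases h2 : PySem.Str.startswith s "missing_fields=" = true
    · obtain ⟨hm, htk⟩ := (pv_sw_fields s).mp h2
      have hin : PySem.Str.isIn "=" s = true := (pv_isIn_str s).mpr hm
      rw [if_neg h1, if_pos h2]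
      simp only [if_pos hin]
      rw [pv_split_eq s hm, pv_pyGetD_zero, pv_pyGetD_one, htk, String.ofList_toList,
        PySem.Dict.getD_insert, PySem.Dict.getD_insert, if_pos rfl,
        if_neg (by decide : ¬ ("missing_pages" : String) = "missing_fields")]
    · rw [if_neg h1, if_neg h2]
      by_cases hin : PySem.Str.isIn "=" s = true
      · have hm := (pv_isIn_str s).mp hin
        simp only [if_pos hin]
        rw [pv_split_eq s hm, pv_pyGetD_zero]
        have hk1 : ¬ (("missing_pages" : String) =
            String.ofList (List.takeWhile (fun x => !decide (x = '=')) s.toList)) := by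
          intro hE
          apply h1
          refine (pv_sw_pages s).mpr ⟨hm, ?_⟩
          have := congrArg String.toList hE
          simpa [String.toList_ofList] using this.symm
        have hk2 : ¬ (("missing_fields" : String) =
            String.ofList (List.takeWhile (fun x => !decide (x = '=')) s.toList)) := by
          intro hE
          apply h2
          refine (pv_sw_fields s).mpr ⟨hm, ?_⟩
          have := congrArg String.toList hE
          simpa [String.toList_ofList] using this.symm
        rw [PySem.Dict.getD_insert, PySem.Dict.getD_insert, if_neg hk1, if_neg hk2]
      · simp only [if_neg hin]

-- named forms of the two loop bodies (proof-side abbreviations; the ports keep their inline lambdas)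
def pvStepA : (List String × List String) → String → (List String × List String) :=
  fun st part =>
    let p := PySem.Str.strip part
    if PySem.Str.startswith p "missing_pages=" then
      (pvItems (PySem.List.pyGetD ((PySem.Str.splitMax? p "=" 1).getD []) 1 ""), st.2)
    else if PySem.Str.startswith p "missing_fields=" then
      (st.1, pvItems (PySem.List.pyGetD ((PySem.Str.splitMax? p "=" 1).getD []) 1 ""))
    else st

def pvStepB : PySem.Dict String String → String → PySem.Dict String String :=
  fun d part =>
    let p := PySem.Str.strip part
    if PySem.Str.isIn "=" p then
      let pieces := (PySem.Str.splitMax? p "=" 1).getD []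
      d.insert (PySem.List.pyGetD pieces 0 "") (PySem.List.pyGetD pieces 1 "")
    else d

lemma pv_step' (part : String) (d : PySem.Dict String String) :
    pvStepA (pvItems (d.getD "missing_pages" ""), pvItems (d.getD "missing_fields" "")) part =
      (pvItems ((pvStepB d part).getD "missing_pages" ""),
       pvItems ((pvStepB d part).getD "missing_fields" "")) := pv_step part d

-- the loop invariant: A's pair state is the two lookups of B's table
lemma pv_loop (parts : List String) (d : PySem.Dict String String) :
    parts.foldl pvStepA
      (pvItems (d.getD "missing_pages" ""), pvItems (d.getD "missing_fields" "")) =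
    (pvItems ((parts.foldl pvStepB d).getD "missing_pages" ""),
     pvItems ((parts.foldl pvStepB d).getD "missing_fields" "")) := by
  induction parts generalizing d with
  | nil => rfl
  | cons part rest ih =>
    simp only [List.foldl_cons]
    rw [pv_step' part d]
    exact ih _

-- ===== VERDICT (by name: the statement is the Claim_ definition above) =====
theorem parse_message_spec : Claim_equal_parse_message := by
  intro message _
  unfold Spec_parse_message parse_message parse_message_alt
  have h0 : (PySem.Dict.empty : PySem.Dict String String).getD "missing_pages" "" = "" := rfl
  have h1 : (PySem.Dict.empty : PySem.Dict String String).getD "missing_fields" "" = "" := rfl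
  have hmain := pv_loop ((PySem.Str.split? (if message = "" then "" else message) ";").getD [])
    PySem.Dict.empty
  rw [h0, h1, pv_pvItems_empty] at hmain
  exact hmain
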